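-- pv_equiv track=rewrite | github.com/trishalmuthan/tjhsst-ai | unit1-search/Rush Hour/rushhour.py | getVertCars
-- ===== SOURCE A (Python) =====
-- def getVertCars(board):
--   carsVert = []
--   for rowNum in range(len(board)-1):
--     for colNum in range(len(board[0])):
--       if board[rowNum][colNum] == board[rowNum+1][colNum]:
--         length = 0
--         for storeRow in range(rowNum, len(board)):
--           if board[rowNum][colNum] == board[storeRow][colNum]:
--             length+=1
--           else:
--             break
--         carsVert.append((board[rowNum][colNum], False, rowNum, colNum, length))
--   carsVert = list(dict.fromkeys(carsVert))
--   seen = set()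
--   finalCarsVert = [(a, b, c, d, e) for a, b, c, d, e in carsVert
--          if not (a in seen or seen.add(a))]
--   return finalCarsVert
-- ===== SOURCE B (Python) =====
-- def getVertCars(board):
--     R = len(board)
--     if R == 0:
--         return []
--     C = len(board[0])
--     # bottom-up DP: down[r][c] = length of the run of equal chars starting at (r, c) going down
--     down = [[1] * C for _ in range(R)]
--     for r in range(R - 2, -1, -1):
--         for c in range(C):
--             if board[r][c] == board[r + 1][c]:
--                 down[r][c] = down[r + 1][c] + 1
--     result = []
--     seen = set()
--     for r in range(R - 1):
--         for c in range(C):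
--             ch = board[r][c]
--             if ch == board[r + 1][c] and ch not in seen:
--                 seen.add(ch)
--                 result.append((ch, False, r, c, down[r][c]))
--     return result
-- ===== Notes on version B (the rewrite author's own statement) =====
-- stated objective: faster
-- what changed: Replaces A's per-cell downward rescan plus two separate dedup/filter passes by a bottom-up DP table of downward run lengths and a single row-major pass keeping the first match per character.
import Mathlib
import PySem

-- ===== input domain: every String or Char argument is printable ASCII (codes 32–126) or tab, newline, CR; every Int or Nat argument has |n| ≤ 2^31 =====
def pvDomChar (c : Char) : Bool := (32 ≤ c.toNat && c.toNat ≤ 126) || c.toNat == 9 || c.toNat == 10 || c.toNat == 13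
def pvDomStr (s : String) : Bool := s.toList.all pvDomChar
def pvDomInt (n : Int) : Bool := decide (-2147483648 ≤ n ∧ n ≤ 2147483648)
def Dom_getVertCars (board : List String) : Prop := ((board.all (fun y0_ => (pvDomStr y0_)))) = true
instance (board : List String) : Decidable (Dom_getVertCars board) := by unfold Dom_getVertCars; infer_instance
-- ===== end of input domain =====

-- B replaces the per-cell downward rescan and the two dedup passes by a bottom-up DP of
-- downward run lengths plus one row-major pass with a seen-set (asymptotically faster).

-- ===== PORT A =====
-- cell access board[r][c] (indices always in range under Pre_; default is irrelevant there)
def pvCell (g : List (List Char)) (r c : Nat) : Char := (g.getD r []).getD c ' '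

-- A's inner 'for storeRow in range(rowNum, len(board))' loop with its break, on the rows from rowNum
def pvScanLen : List (List Char) → Char → Nat → Nat
  | [], _, _ => 0
  | row :: rest, ch, c => if row.getD c ' ' == ch then pvScanLen rest ch c + 1 else 0

def getVertCars (board : List String) : List (String × Bool × Int × Int × Int) :=
  let g := board.map String.toList
  let carsVert := (List.range (g.length - 1)).foldl (fun acc r =>
    (List.range (g.headD []).length).foldl (fun acc c =>
      if pvCell g r c == pvCell g (r+1) c then
        acc ++ [(String.mk [pvCell g r c], false, (r : Int), (c : Int),
                 (pvScanLen (g.drop r) (pvCell g r c) c : Int))]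
      else acc) acc) []
  let dedup := carsVert.foldl (fun out t => if t ∈ out then out else out ++ [t])
    ([] : List (String × Bool × Int × Int × Int))
  (dedup.foldl (fun (p : List String × List (String × Bool × Int × Int × Int)) t =>
      if t.1 ∈ p.1 then p else (p.1 ++ [t.1], p.2 ++ [t])) ([], [])).2

-- ===== PORT B =====
-- bottom-up DP: down[r][c] = length of the run of equal chars starting at (r,c) going down
def pvBuildDown : List (List Char) → Nat → List (List Nat)
  | [], _ => []
  | [_row], C => [(List.range C).map (fun _ => (1 : Nat))]
  | row :: nrow :: rest, C =>
    let below := pvBuildDown (nrow :: rest) C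
    ((List.range C).map (fun c =>
      if row.getD c ' ' == nrow.getD c ' ' then (below.headD []).getD c 1 + 1 else 1)) :: below

def getVertCars_alt (board : List String) : List (String × Bool × Int × Int × Int) :=
  let g := board.map String.toList
  if g.length = 0 then [] else
  let C := (g.headD []).length
  let down := pvBuildDown g C
  ((List.range (g.length - 1)).foldl
    (fun (p : List String × List (String × Bool × Int × Int × Int)) r =>
      (List.range C).foldl (fun p c =>
        if pvCell g r c == pvCell g (r+1) c ∧ String.mk [pvCell g r c] ∉ p.1 then
          (p.1 ++ [String.mk [pvCell g r c]],
           p.2 ++ [(String.mk [pvCell g r c], false, (r : Int), (c : Int),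
                    ((down.getD r []).getD c 1 : Int))])
        else p) p) (([], []) : List String × List (String × Bool × Int × Int × Int))).2

-- ===== PRECONDITION & SPEC =====
-- Pre_ excludes exactly the ragged boards on which Python A raises IndexError
-- (a row shorter than row 0 is indexed at a column it does not have).
def Pre_getVertCars (board : List String) : Prop :=
  board.length ≤ 1 ∨ ∀ s ∈ board, (board.headD "").length ≤ s.length
instance (board : List String) : Decidable (Pre_getVertCars board) := by
  unfold Pre_getVertCars; infer_instance

def pvWitness_getVertCars : List String := ["AA", "AB"]

def Spec_getVertCars (board : List String) (out : List (String × Bool × Int × Int × Int)) : Prop := out = getVertCars_alt board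
instance (board : List String) (out : List (String × Bool × Int × Int × Int)) : Decidable (Spec_getVertCars board out) := by unfold Spec_getVertCars; infer_instance

-- ===== CLAIM (what is proved, stated in full; the proofs are below) =====
def Claim_equal_getVertCars : Prop := ∀ (board : List String), Dom_getVertCars board → Pre_getVertCars board → Spec_getVertCars board (getVertCars board)

-- ===== LEMMAS AND PROOFS =====

-- the per-tuple step of the final "first per char" filters in both ports
def pvFFStep (p : List String × List (String × Bool × Int × Int × Int))
    (t : String × Bool × Int × Int × Int) : List String × List (String × Bool × Int × Int × Int) :=
  if t.1 ∈ p.1 then p else (p.1 ++ [t.1], p.2 ++ [t])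

-- structural form of the "first per char" filter
def pvFF : List String → List (String × Bool × Int × Int × Int) → List (String × Bool × Int × Int × Int)
  | _, [] => []
  | seen, t :: l => if t.1 ∈ seen then pvFF seen l else t :: pvFF (seen ++ [t.1]) l

-- structural form of dict.fromkeys dedup
def pvDD : List (String × Bool × Int × Int × Int) → List (String × Bool × Int × Int × Int) → List (String × Bool × Int × Int × Int)
  | _, [] => []
  | out, t :: l => if t ∈ out then pvDD out l else t :: pvDD (out ++ [t]) l

-- the row-major list of vertical matches, parameterised by how the run length is computed
def pvGen (g : List (List Char)) (C : Nat) (lenF : Nat → Nat → Nat) : List (String × Bool × Int × Int × Int) :=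
  (List.range (g.length - 1)).flatMap (fun r =>
    ((List.range C).filter (fun c => pvCell g r c == pvCell g (r+1) c)).map (fun c =>
      (String.mk [pvCell g r c], false, (r : Int), (c : Int), (lenF r c : Int))))

theorem pvFF_foldl (l : List (String × Bool × Int × Int × Int)) :
    ∀ (seen : List String) (res : List (String × Bool × Int × Int × Int)),
    l.foldl pvFFStep (seen, res) = (seen ++ (pvFF seen l).map (·.1), res ++ pvFF seen l) := by
  induction l with
  | nil => simp [pvFF]
  | cons t l ih =>
    intro seen res
    by_cases h : t.1 ∈ seen <;>
      simp [pvFFStep, pvFF, h, List.foldl_cons, ih, List.append_assoc]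

theorem pvDD_foldl (l : List (String × Bool × Int × Int × Int)) :
    ∀ out, l.foldl (fun out t => if t ∈ out then out else out ++ [t]) out = out ++ pvDD out l := by
  induction l with
  | nil => simp [pvDD]
  | cons t l ih =>
    intro out
    by_cases h : t ∈ out <;> simp [pvDD, h, List.foldl_cons, ih, List.append_assoc]

theorem pvFF_pvDD (l : List (String × Bool × Int × Int × Int)) :
    ∀ (out : List (String × Bool × Int × Int × Int)) (seen : List String),
    (∀ t ∈ out, t.1 ∈ seen) → pvFF seen (pvDD out l) = pvFF seen l := by
  induction l with
  | nil => intro out seen _; rfl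
  | cons t l ih =>
    intro out seen hinv
    by_cases ht : t ∈ out
    · simp only [pvDD, if_pos ht, pvFF, if_pos (hinv t ht)]
      exact ih out seen hinv
    · simp only [pvDD, if_neg ht, pvFF]
      by_cases hk : t.1 ∈ seen
      · rw [if_pos hk, if_pos hk]
        exact ih (out ++ [t]) seen (by
          intro u hu
          rcases List.mem_append.mp hu with h | h
          · exact hinv u h
          · simp at h; subst h; exact hk)
      · rw [if_neg hk, if_neg hk]
        congr 1
        exact ih (out ++ [t]) (seen ++ [t.1]) (by
          intro u hu
          rcases List.mem_append.mp hu with h | h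
          · exact List.mem_append.mpr (Or.inl (hinv u h))
          · simp at h; subst h; simp)

-- head row of the DP table for a board with at least one row
def pvBuildDownHead (row : List Char) (rest : List (List Char)) (C : Nat) : List Nat :=
  match rest with
  | [] => (List.range C).map (fun _ => (1 : Nat))
  | nrow :: rest' =>
    (List.range C).map (fun c =>
      if row.getD c ' ' == nrow.getD c ' '
      then ((pvBuildDown (nrow :: rest') C).headD []).getD c 1 + 1 else 1)

theorem pvBuildDown_cons (row : List Char) (rest : List (List Char)) (C : Nat) :
    pvBuildDown (row :: rest) C = pvBuildDownHead row rest C :: pvBuildDown rest C := by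
  cases rest <;> rfl

theorem pvDown_eq (g : List (List Char)) (C : Nat) :
    ∀ r c, r < g.length → c < C →
    ((pvBuildDown g C).getD r []).getD c 1 = pvScanLen (g.drop r) (pvCell g r c) c := by
  induction g with
  | nil => intro r c hr _; simp at hr
  | cons row rest ih =>
    intro r c hr hc
    cases r with
    | succ r' =>
      have hr' : r' < rest.length := by simpa using hr
      have h1 : pvBuildDown (row :: rest) C = pvBuildDownHead row rest C :: pvBuildDown rest C :=
        pvBuildDown_cons row rest C
      rw [h1, List.getD_cons_succ, List.drop_succ_cons]
      exact ih r' c hr' hc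
    | zero =>
      rw [pvBuildDown_cons, List.getD_cons_zero, List.getD_eq_getElem?_getD]
      have hch : pvCell (row :: rest) 0 c = row.getD c ' ' := rfl
      cases rest with
      | nil =>
        simp only [pvBuildDownHead]
        rw [List.getElem?_map, List.getElem?_range hc]
        simp only [Option.map_some, Option.getD_some, List.drop_zero, hch,
          pvScanLen, beq_self_eq_true, if_true]
      | cons nrow rest' =>
        simp only [pvBuildDownHead]
        rw [List.getElem?_map, List.getElem?_range hc]
        simp only [Option.map_some, Option.getD_some, List.drop_zero, hch]
        have hih := ih 0 c (by simp) hc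
        simp only [List.drop_zero] at hih
        have hch2 : pvCell (nrow :: rest') 0 c = nrow.getD c ' ' := rfl
        rw [hch2] at hih
        have hhead : (pvBuildDown (nrow :: rest') C).headD [] =
            (pvBuildDown (nrow :: rest') C).getD 0 [] := by
          cases h : pvBuildDown (nrow :: rest') C <;> rfl
        rw [hhead, hih]
        by_cases heq : row[c]?.getD ' ' = nrow[c]?.getD ' '
        · simp [pvScanLen, List.getD_eq_getElem?_getD, heq]
        · simp [pvScanLen, List.getD_eq_getElem?_getD, heq, Ne.symm heq]

theorem pvGen_congr (g : List (List Char)) (C : Nat) (f f' : Nat → Nat → Nat)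
    (h : ∀ r c, r < g.length - 1 → c < C → f r c = f' r c) :
    pvGen g C f = pvGen g C f' := by
  unfold pvGen
  apply List.flatMap_congr
  intro r hr
  apply List.map_congr_left
  intro c hcf
  have hc : c < C := List.mem_range.mp (List.mem_filter.mp hcf).1
  rw [h r c (List.mem_range.mp hr) hc]

theorem pvGen_fold (g : List (List Char)) (C : Nat) (lenF : Nat → Nat → Nat) :
    (List.range (g.length - 1)).foldl (fun acc r =>
      (List.range C).foldl (fun acc c =>
        if pvCell g r c == pvCell g (r+1) c then
          acc ++ [(String.mk [pvCell g r c], false, (r : Int), (c : Int), (lenF r c : Int))]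
        else acc) acc) [] = pvGen g C lenF := by
  have h1 : ∀ (acc : List (String × Bool × Int × Int × Int)) r, r ∈ List.range (g.length - 1) →
      (List.range C).foldl (fun acc c =>
        if pvCell g r c == pvCell g (r+1) c then
          acc ++ [(String.mk [pvCell g r c], false, (r : Int), (c : Int), (lenF r c : Int))]
        else acc) acc
      = acc ++ ((List.range C).filter (fun c => pvCell g r c == pvCell g (r+1) c)).map (fun c =>
          (String.mk [pvCell g r c], false, (r : Int), (c : Int), (lenF r c : Int))) := by
    intro acc r _
    exact PySem.List.foldl_append_if
      (p := fun c => pvCell g r c == pvCell g (r+1) c)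
      (f := fun c => (String.mk [pvCell g r c], false, (r : Int), (c : Int), (lenF r c : Int)))
      (List.range C) acc
  rw [PySem.List.foldl_congr_mem (List.range (g.length - 1)) _
        (fun acc r => acc ++ ((List.range C).filter (fun c => pvCell g r c == pvCell g (r+1) c)).map
          (fun c => (String.mk [pvCell g r c], false, (r : Int), (c : Int), (lenF r c : Int)))) [] h1,
      PySem.List.foldl_append_eq_flatMap]
  rfl

theorem pvA_eq (board : List String) :
    getVertCars board = pvFF [] (pvGen (board.map String.toList) ((board.map String.toList).headD []).length
      (fun r c => pvScanLen ((board.map String.toList).drop r) (pvCell (board.map String.toList) r c) c)) := by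
  unfold getVertCars
  simp only []
  rw [pvGen_fold, pvDD_foldl]
  have hstep : (fun (p : List String × List (String × Bool × Int × Int × Int)) t =>
      if t.1 ∈ p.1 then p else (p.1 ++ [t.1], p.2 ++ [t])) = pvFFStep := rfl
  rw [hstep, pvFF_foldl]
  rw [List.nil_append, List.nil_append]
  exact pvFF_pvDD _ [] [] (by simp)

theorem pvB_fold (g : List (List Char)) (C : Nat) (lenF : Nat → Nat → Nat)
    (init : List String × List (String × Bool × Int × Int × Int)) :
    (List.range (g.length - 1)).foldl
      (fun p r => (List.range C).foldl (fun p c =>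
        if pvCell g r c == pvCell g (r+1) c ∧ String.mk [pvCell g r c] ∉ p.1 then
          (p.1 ++ [String.mk [pvCell g r c]],
           p.2 ++ [(String.mk [pvCell g r c], false, (r : Int), (c : Int), (lenF r c : Int))])
        else p) p) init
    = (pvGen g C lenF).foldl pvFFStep init := by
  unfold pvGen
  rw [List.foldl_flatMap]
  apply PySem.List.foldl_congr_mem
  intro p r _
  rw [List.foldl_map]
  rw [← PySem.List.foldl_if_eq_foldl_filter
        (fun c => pvCell g r c == pvCell g (r+1) c)
        (fun p c => pvFFStep p (String.mk [pvCell g r c], false, (r : Int), (c : Int), (lenF r c : Int)))]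
  apply PySem.List.foldl_congr_mem
  intro q c _
  by_cases hcond : (pvCell g r c == pvCell g (r+1) c) = true
  · by_cases hmem : String.mk [pvCell g r c] ∈ q.1
    · rw [if_neg (by simp [hmem]), if_pos hcond, pvFFStep, if_pos hmem]
    · rw [if_pos ⟨hcond, hmem⟩, if_pos hcond, pvFFStep, if_neg hmem]
  · rw [if_neg (by simp [hcond]), if_neg hcond]

theorem pvB_eq (board : List String) (h : board ≠ []) :
    getVertCars_alt board = pvFF [] (pvGen (board.map String.toList) ((board.map String.toList).headD []).length
      (fun r c => ((pvBuildDown (board.map String.toList) ((board.map String.toList).headD []).length).getD r []).getD c 1)) := by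
  unfold getVertCars_alt
  simp only []
  rw [if_neg (by simpa using h)]
  rw [pvB_fold]
  rw [pvFF_foldl]
  simp

-- ===== VERDICT (by name: the statement is the Claim_ definition above) =====
theorem getVertCars_spec : Claim_equal_getVertCars := by
  intro board _ _
  unfold Spec_getVertCars
  cases board with
  | nil => rfl
  | cons b bs =>
    rw [pvA_eq, pvB_eq (b :: bs) (by simp)]
    exact congrArg (pvFF [])
      (pvGen_congr _ _ _ _ (fun r c hr hc =>
        (pvDown_eq _ _ r c (Nat.lt_of_lt_of_le hr (Nat.sub_le _ _)) hc).symm))
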